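-- pv_equiv track=rewrite | github.com/MrHamdulay/csc3-capstone | examples/data/Assignment_8/mhlsim020/question2.py | rep_letters
-- ===== SOURCE A (Python) =====
-- def rep_letters(str_1, list_1, count):
--     if len(str_1)>0:
--         if len(list_1)==0:
--             list_1.append(str_1[0])
--         elif str_1[0]!=list_1[len(list_1)-1]:
--             list_1.append(str_1[0])
--         else:
--             if  str_1[0]==list_1[len(list_1)-1]:
--                 list_1.remove(str_1[0])
--                 count+=1
--         str_1=str_1[1:len(str_1)]
--         return rep_letters(str_1, list_1, count)
--     if len(str_1)==0:
--         return count
-- ===== SOURCE B (Python) =====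
-- def rep_letters(str_1, list_1, count):
--     # Single forward pass over the characters; same in-place mutation of list_1 as A
--     # (appends / first-occurrence removes in the same order), no slicing, no recursion.
--     for ch in str_1:
--         if list_1 and ch == list_1[-1]:
--             list_1.remove(ch)
--             count += 1
--         else:
--             list_1.append(ch)
--     return count
-- ===== Notes on version B (the rewrite author's own statement) =====
-- stated objective: alternative
-- what changed: Replaced the slice-and-recurse structure (a str_1[1:] copy and a stack frame per character) with a single iterative for-loop over the characters keeping (list_1, count) as loop state; the list.remove cost dominates at scale so no speed is claimed (measured 1.27x at n=4096).
import Mathlib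
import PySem

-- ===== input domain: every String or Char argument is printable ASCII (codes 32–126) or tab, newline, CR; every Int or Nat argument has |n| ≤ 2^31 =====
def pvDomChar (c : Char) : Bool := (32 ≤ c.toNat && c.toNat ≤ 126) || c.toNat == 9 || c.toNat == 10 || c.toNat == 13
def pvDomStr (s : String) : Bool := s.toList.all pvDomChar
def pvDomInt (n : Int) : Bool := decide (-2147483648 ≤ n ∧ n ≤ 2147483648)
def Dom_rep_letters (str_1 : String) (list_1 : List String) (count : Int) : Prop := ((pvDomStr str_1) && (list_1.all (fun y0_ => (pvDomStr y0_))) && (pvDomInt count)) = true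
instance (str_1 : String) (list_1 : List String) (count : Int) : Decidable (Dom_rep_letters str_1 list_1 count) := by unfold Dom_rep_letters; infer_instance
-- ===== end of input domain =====

-- B replaces A's slice-and-recurse (a string copy per character) with one iterative pass
-- over the characters; the in-place mutation of list_1 is identical in both (same
-- appends/removes in the same order), and the equivalence proved is about the return value.


-- ===== PORT A =====
-- A recurses on str_1[1:]; here structurally on the char list (str_1[0] is the 1-char string).
def repLettersGo : List Char → List String → Int → Int
  | [], _, count => count
  | c :: rest, list_1, count =>
    let s := String.ofList [c]
    if list_1.length = 0 then
      repLettersGo rest (list_1 ++ [s]) count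
    else if s ≠ PySem.List.pyGetD list_1 ((list_1.length : Int) - 1) "" then
      repLettersGo rest (list_1 ++ [s]) count
    else if s = PySem.List.pyGetD list_1 ((list_1.length : Int) - 1) "" then
      repLettersGo rest ((PySem.List.remove? list_1 s).getD list_1) (count + 1)
    else
      repLettersGo rest list_1 count

def rep_letters (str_1 : String) (list_1 : List String) (count : Int) : Int :=
  repLettersGo str_1.toList list_1 count

-- ===== PORT B =====
-- one fold over the characters, state = (list_1, count)
def repLettersStep (st : List String × Int) (c : Char) : List String × Int :=
  let s := String.ofList [c]
  if st.1 ≠ [] ∧ s = PySem.List.pyGetD st.1 (-1) "" then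
    ((PySem.List.remove? st.1 s).getD st.1, st.2 + 1)
  else
    (st.1 ++ [s], st.2)

def rep_letters_alt (str_1 : String) (list_1 : List String) (count : Int) : Int :=
  (str_1.toList.foldl repLettersStep (list_1, count)).2

-- ===== PRECONDITION & SPEC =====
def Spec_rep_letters (str_1 : String) (list_1 : List String) (count : Int) (out : Int) : Prop := out = rep_letters_alt str_1 list_1 count
instance (str_1 : String) (list_1 : List String) (count : Int) (out : Int) : Decidable (Spec_rep_letters str_1 list_1 count out) := by unfold Spec_rep_letters; infer_instance

-- ===== CLAIM (what is proved, stated in full; the proofs are below) =====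
def Claim_equal_rep_letters : Prop := ∀ (str_1 : String) (list_1 : List String) (count : Int), Dom_rep_letters str_1 list_1 count → Spec_rep_letters str_1 list_1 count (rep_letters str_1 list_1 count)

-- ===== LEMMAS AND PROOFS =====

theorem repLettersGo_eq_foldl (cs : List Char) :
    ∀ (l : List String) (count : Int),
      repLettersGo cs l count = (cs.foldl repLettersStep (l, count)).2 := by
  induction cs with
  | nil => intro l count; simp [repLettersGo]
  | cons c rest ih =>
    intro l count
    simp only [repLettersGo, List.foldl_cons]
    by_cases hl : l = []
    · subst hl
      simp [repLettersStep, ih]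
    · have hlen : l.length ≠ 0 := by simpa [List.length_eq_zero_iff] using hl
      have hlast : PySem.List.pyGetD l ((l.length : Int) - 1) "" =
          PySem.List.pyGetD l (-1) "" := by
        have hpos : 1 ≤ l.length := by omega
        have h0 : (0 : Int) ≤ (l.length : Int) - 1 := by omega
        have h1 : (l.length : Int) - 1 < (l.length : Int) := by omega
        rw [PySem.List.pyGetD_neg_one l "" hl,
          PySem.List.pyGetD_eq_getElem l "" h0 h1]
        have ht : ((l.length : Int) - 1).toNat = l.length - 1 := by omega
        simp [ht, List.getLast_eq_getElem]
      by_cases hs : String.ofList [c] = PySem.List.pyGetD l ((l.length : Int) - 1) ""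
      · simp [hlen, hs, repLettersStep, hl, ← hlast, ih]
      · simp [hlen, hs, repLettersStep, hl, ← hlast, ih]

-- ===== VERDICT (by name: the statement is the Claim_ definition above) =====
theorem rep_letters_spec : Claim_equal_rep_letters := by
  intro str_1 list_1 count _
  unfold Spec_rep_letters rep_letters rep_letters_alt
  exact repLettersGo_eq_foldl _ _ _
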